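-- pv_equiv track=rewrite | github.com/CHEN-Zhaohui/_python_learning | 6_longestPalindrome.py | force
-- ===== SOURCE A (Python) =====
-- def force(s):
--     length, longest = 0, []
--     for i in range(len(s)-1):
--         for j in range(i+1, len(s)):
--             if s[j] == s[i]:
--                 # 判断是否为回文字符串
--                 if s[i:j+1] == s[i:j+1][::-1]:
--                     if length <= j - i + 1:
--                         length = j - i + 1
--                         longest += [s[i:j+1]]
--     return longest
-- ===== SOURCE B (Python) =====
-- def force(s):
--     n = len(s)
--     # O(n^2): palindrome DP table filled by increasing substring length, then the
--     # collection loop does O(1) table lookups instead of O(n) slice comparisons.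
--     pal = [[False] * n for _ in range(n)]
--     for i in range(n):
--         pal[i][i] = True
--     for ln in range(2, n + 1):
--         for i in range(n - ln + 1):
--             j = i + ln - 1
--             pal[i][j] = s[i] == s[j] and (ln == 2 or pal[i + 1][j - 1])
--     length, longest = 0, []
--     for i in range(n - 1):
--         for j in range(i + 1, n):
--             if pal[i][j] and length <= j - i + 1:
--                 length = j - i + 1
--                 longest.append(s[i:j + 1])
--     return longest
-- ===== Notes on version B (the rewrite author's own statement) =====
-- stated objective: faster
-- what changed: B precomputes a dynamic-programming table pal[i][j] (substring i..j is a palindrome) by increasing length, so the collection double loop tests each pair in O(1) instead of A's O(n) slice-reverse comparison; intended as asymptotically faster (O(n^2) vs O(n^3)), measured 6.2x at n=1024, the largest size at which A still finishes.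
import Mathlib
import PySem

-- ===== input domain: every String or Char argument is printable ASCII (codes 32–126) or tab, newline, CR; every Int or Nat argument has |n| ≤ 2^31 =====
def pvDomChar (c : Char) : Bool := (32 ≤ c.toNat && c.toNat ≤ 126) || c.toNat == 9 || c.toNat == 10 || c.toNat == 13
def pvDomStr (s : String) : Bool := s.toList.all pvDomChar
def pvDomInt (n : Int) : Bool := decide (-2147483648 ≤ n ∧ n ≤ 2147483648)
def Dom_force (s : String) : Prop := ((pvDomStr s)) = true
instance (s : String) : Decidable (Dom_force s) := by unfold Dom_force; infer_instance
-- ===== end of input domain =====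

-- B replaces A's slice-reverse palindrome test inside the double loop by a precomputed
-- DP table read, intended as faster (measured 6.2x at n=1024 in a timing run).

-- ===== PORT A =====
def force (s : String) : List String :=
  let cs := s.toList
  let n : Int := PySem.List.len cs
  (((PySem.List.pyRange 0 (n - 1) 1).foldl (fun (st : Int × List String) i =>
      (PySem.List.pyRange (i + 1) n 1).foldl (fun (st : Int × List String) j =>
        if PySem.List.pyGetD cs j ' ' == PySem.List.pyGetD cs i ' ' then
          let t := PySem.List.slice cs (some i) (some (j + 1))
          if PySem.List.slice? t none none (-1) == some t then
            if st.1 ≤ j - i + 1 then (j - i + 1, st.2 ++ [String.ofList t])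
            else st
          else st
        else st) st) ((0 : Int), ([] : List String))).2)

-- ===== PORT B =====
def force_alt (s : String) : List String :=
  let cs := s.toList
  let n : Int := PySem.List.len cs
  let pal0 : List (List Bool) := (PySem.List.pyRange 0 n 1).map (fun _ => List.replicate n.toNat false)
  let pal1 := (PySem.List.pyRange 0 n 1).foldl (fun pal i =>
      PySem.List.pySetD pal i (PySem.List.pySetD (PySem.List.pyGetD pal i []) i true)) pal0
  let pal := (PySem.List.pyRange 2 (n + 1) 1).foldl (fun pal ln =>
      (PySem.List.pyRange 0 (n - ln + 1) 1).foldl (fun pal i =>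
        let j := i + ln - 1
        PySem.List.pySetD pal i (PySem.List.pySetD (PySem.List.pyGetD pal i []) j
          ((PySem.List.pyGetD cs i ' ' == PySem.List.pyGetD cs j ' ') &&
            (ln == 2 || PySem.List.pyGetD (PySem.List.pyGetD pal (i + 1) []) (j - 1) false)))) pal) pal1
  (((PySem.List.pyRange 0 (n - 1) 1).foldl (fun (st : Int × List String) i =>
      (PySem.List.pyRange (i + 1) n 1).foldl (fun (st : Int × List String) j =>
        if PySem.List.pyGetD (PySem.List.pyGetD pal i []) j false && decide (st.1 ≤ j - i + 1) then
          (j - i + 1, st.2 ++ [String.ofList (PySem.List.slice cs (some i) (some (j + 1)))])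
        else st) st) ((0 : Int), ([] : List String))).2)

-- ===== PRECONDITION & SPEC =====
def Spec_force (s : String) (out : List String) : Prop := out = force_alt s
instance (s : String) (out : List String) : Decidable (Spec_force s out) := by unfold Spec_force; infer_instance

-- ===== CLAIM (what is proved, stated in full; the proofs are below) =====
def Claim_equal_force : Prop := ∀ (s : String), Dom_force s → Spec_force s (force s)

-- ===== LEMMAS AND PROOFS =====

-- The reference palindrome predicate, recursing from both ends (matches B's DP recurrence).
def pdRec (cs : List Char) (i j : Nat) : Bool :=
  if _h : i < j then
    (cs.getD i ' ' == cs.getD j ' ') && (j == i + 1 || pdRec cs (i + 1) (j - 1))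
  else true
termination_by j - i
decreasing_by omega

-- the substring s[a..b] (both ends included)
def subl (cs : List Char) (a b : Nat) : List Char := (cs.drop a).take (b + 1 - a)

theorem subl_single (cs : List Char) (a : Nat) (h : a < cs.length) :
    subl cs a a = [cs.getD a ' '] := by
  unfold subl
  have h1 : a + 1 - a = 1 := by omega
  rw [h1, List.drop_eq_getElem_cons h, List.take_succ_cons, List.take_zero]
  simp [List.getD_eq_getElem?_getD, List.getElem?_eq_getElem h]

theorem subl_decomp (cs : List Char) (a b : Nat) (hab : a < b) (hb : b < cs.length) :
    subl cs a b = cs.getD a ' ' :: (cs.drop (a + 1)).take (b - a - 1) ++ [cs.getD b ' '] := by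
  unfold subl
  rw [List.drop_eq_getElem_cons (by omega : a < cs.length)]
  have h1 : b + 1 - a = (b - a - 1 + 1) + 1 := by omega
  rw [h1, List.take_succ_cons, List.take_add_one]
  have h2 : (cs.drop (a+1))[b - a - 1]? = some cs[b] := by
    rw [List.getElem?_drop, List.getElem?_eq_getElem (by omega)]
    congr 1; congr 1; omega
  rw [h2]
  simp [List.getD_eq_getElem?_getD, List.getElem?_eq_getElem hb,
    List.getElem?_eq_getElem (show a < cs.length by omega)]

theorem pal_cons_append (x y : Char) (l : List Char) :
    (x :: l ++ [y] = (x :: l ++ [y]).reverse) ↔ (x = y ∧ l = l.reverse) := by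
  have hrev : (x :: l ++ [y]).reverse = y :: (l.reverse ++ [x]) := by simp
  rw [hrev, List.cons_append, List.cons_eq_cons]
  constructor
  · rintro ⟨rfl, h2⟩
    exact ⟨rfl, (List.append_left_inj [x]).mp h2⟩
  · rintro ⟨rfl, h⟩
    exact ⟨rfl, by rw [← h]⟩

theorem pdRec_spec (cs : List Char) (a b : Nat) (hab : a ≤ b) (hb : b < cs.length) :
    pdRec cs a b = decide (subl cs a b = (subl cs a b).reverse) := by
  by_cases h : a < b
  · rw [pdRec, dif_pos h, subl_decomp cs a b h hb,
      (decide_eq_decide).mpr (pal_cons_append _ _ _), Bool.decide_and]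
    by_cases hb1 : b = a + 1
    · subst hb1
      have h0 : a + 1 - a - 1 = 0 := by omega
      rw [h0, List.take_zero]
      simp [Bool.beq_eq_decide_eq]
    · have IH := pdRec_spec cs (a + 1) (b - 1) (by omega) (by omega)
      have harith : b - 1 + 1 - (a + 1) = b - a - 1 := by omega
      unfold subl at IH
      rw [harith] at IH
      rw [← IH]
      have hbne : (b == a + 1) = false := by simp [hb1]
      rw [hbne]
      simp [Bool.beq_eq_decide_eq]
  · have hab2 : a = b := by omega
    subst hab2
    rw [pdRec, dif_neg h, subl_single cs a hb]
    simp
termination_by b - a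
decreasing_by omega

-- A's composite test equals the palindrome predicate
theorem condA_eq (cs : List Char) (a b : Nat) (hab : a < b) (hb : b < cs.length) :
    ((PySem.List.pyGetD cs (b : Int) ' ' == PySem.List.pyGetD cs (a : Int) ' ') &&
      (PySem.List.slice? (PySem.List.slice cs (some (a : Int)) (some ((b : Int) + 1))) none none (-1)
        == some (PySem.List.slice cs (some (a : Int)) (some ((b : Int) + 1)))))
    = pdRec cs a b := by
  have hcast : ((b : Int) + 1) = ((b + 1 : Nat) : Int) := by push_cast; ring
  have ht : PySem.List.slice cs (some (a : Int)) (some ((b : Int) + 1)) = subl cs a b := by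
    rw [hcast, PySem.List.slice_natCast]; rfl
  rw [ht, PySem.List.slice?_none_none_neg_one, pdRec_spec cs a b (le_of_lt hab) hb]
  simp only [PySem.List.pyGetD_natCast]
  by_cases hp : subl cs a b = (subl cs a b).reverse
  · have hd := subl_decomp cs a b hab hb
    have hxy := (pal_cons_append _ _ _).mp (by rw [← hd]; exact hp)
    have e1 : (cs.getD b ' ' == cs.getD a ' ') = true := by
      rw [hxy.1]; exact beq_self_eq_true _
    have e2 : (some (subl cs a b).reverse == some (subl cs a b)) = true := by
      rw [← hp]; exact beq_self_eq_true _
    rw [e1, e2, decide_eq_true hp]; rfl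
  · have hp' : (subl cs a b).reverse ≠ subl cs a b := fun hh => hp hh.symm
    simp [hp, hp']

-- ## table machinery

-- the table cell read "pal[a][b]"
def getP (pal : List (List Bool)) (a b : Nat) : Bool := (pal.getD a []).getD b false

def Shape (n : Nat) (pal : List (List Bool)) : Prop :=
  pal.length = n ∧ ∀ r ∈ pal, r.length = n

-- table invariant after all lengths ≤ m have been filled in
def PalInv (cs : List Char) (m : Nat) (pal : List (List Bool)) : Prop :=
  ∀ a b : Nat, a ≤ b → b < cs.length →
    getP pal a b = if b + 1 - a ≤ m then pdRec cs a b else false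

theorem getD_set_2 {α : Type} (l : List α) (d : α) (i j : Nat) (r : α) :
    (l.set i r).getD j d = if i = j ∧ i < l.length then r else l.getD j d := by
  simp only [List.getD_eq_getElem?_getD, List.getElem?_set]
  split_ifs <;> simp_all <;> omega

theorem rowlen (cs : List Char) (pal : List (List Bool)) (hS : Shape cs.length pal)
    (i : Nat) (hi : i < cs.length) : (pal.getD i []).length = cs.length := by
  have hil : i < pal.length := by rw [hS.1]; exact hi
  rw [List.getD_eq_getElem?_getD, List.getElem?_eq_getElem hil]
  exact hS.2 _ (List.getElem_mem hil)

theorem shape_update (cs : List Char) (pal : List (List Bool)) (hS : Shape cs.length pal)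
    (i j : Nat) (hi : i < cs.length) (v : Bool) :
    Shape cs.length (pal.set i ((pal.getD i []).set j v)) := by
  refine ⟨by rw [List.length_set]; exact hS.1, ?_⟩
  intro r hr
  rcases List.mem_or_eq_of_mem_set hr with h | rfl
  · exact hS.2 _ h
  · rw [List.length_set]
    exact rowlen cs pal hS i hi

theorem getP_update (cs : List Char) (pal : List (List Bool)) (hS : Shape cs.length pal)
    (i j : Nat) (hi : i < cs.length) (hj : j < cs.length) (v : Bool) (a b : Nat) :
    getP (pal.set i ((pal.getD i []).set j v)) a b
      = if i = a ∧ j = b then v else getP pal a b := by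
  unfold getP
  rw [getD_set_2]
  have hil : i < pal.length := by rw [hS.1]; exact hi
  by_cases hia : i = a
  · subst hia
    rw [if_pos ⟨rfl, hil⟩, getD_set_2]
    have hjl : j < (pal.getD i []).length := by rw [rowlen cs pal hS i hi]; exact hj
    by_cases hjb : j = b
    · subst hjb; rw [if_pos ⟨rfl, hjl⟩, if_pos ⟨rfl, rfl⟩]
    · rw [if_neg (by tauto), if_neg (by tauto)]
  · rw [if_neg (by tauto), if_neg (by tauto)]


-- the diagonal-initialisation loop sets exactly the cells (a,a), a < m
theorem diag_fold (cs : List Char) (pal : List (List Bool)) (hS : Shape cs.length pal)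
    (h0 : ∀ a b : Nat, getP pal a b = false) (m : Nat) (hm : m ≤ cs.length) :
    Shape cs.length ((PySem.List.pyRange 0 (m : Int) 1).foldl (fun pal i =>
      PySem.List.pySetD pal i (PySem.List.pySetD (PySem.List.pyGetD pal i []) i true)) pal) ∧
    ∀ a b : Nat, getP ((PySem.List.pyRange 0 (m : Int) 1).foldl (fun pal i =>
      PySem.List.pySetD pal i (PySem.List.pySetD (PySem.List.pyGetD pal i []) i true)) pal) a b
      = if a = b ∧ a < m then true else false := by
  induction m with
  | zero =>
    rw [show ((0 : Nat) : Int) = 0 by rfl, PySem.List.pyRange_one_eq_nil (by omega)]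
    exact ⟨hS, by simpa using h0⟩
  | succ m ih =>
    have ih' := ih (by omega)
    rw [show ((m + 1 : Nat) : Int) = (m : Int) + 1 by push_cast; ring,
      PySem.List.pyRange_one_succ_right (by omega), List.foldl_append]
    set palm := (PySem.List.pyRange 0 (m : Int) 1).foldl (fun pal i =>
      PySem.List.pySetD pal i (PySem.List.pySetD (PySem.List.pyGetD pal i []) i true)) pal with hpalm
    simp only [List.foldl_cons, List.foldl_nil, PySem.List.pySetD_natCast, PySem.List.pyGetD_natCast]
    have hSm := ih'.1
    have hm' : m < cs.length := by omega
    refine ⟨shape_update cs palm hSm m m hm' true, ?_⟩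
    intro a b
    rw [getP_update cs palm hSm m m hm' hm' true a b, ih'.2 a b]
    split_ifs <;> first | rfl | omega
  
-- one DP round (substring length L) fills exactly the cells of length L with pdRec
theorem round_fold (cs : List Char) (L : Nat) (hL2 : 2 ≤ L) (hLn : L ≤ cs.length)
    (pal : List (List Bool)) (hS : Shape cs.length pal) (hI : PalInv cs (L - 1) pal)
    (m : Nat) (hm : m ≤ cs.length - L + 1) :
    Shape cs.length ((PySem.List.pyRange 0 (m : Int) 1).foldl (fun pal i =>
      PySem.List.pySetD pal i (PySem.List.pySetD (PySem.List.pyGetD pal i []) (i + (L : Int) - 1)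
        ((PySem.List.pyGetD cs i ' ' == PySem.List.pyGetD cs (i + (L : Int) - 1) ' ') &&
          ((L : Int) == 2 || PySem.List.pyGetD (PySem.List.pyGetD pal (i + 1) []) (i + (L : Int) - 1 - 1) false)))) pal) ∧
    ∀ a b : Nat, a ≤ b → b < cs.length →
      getP ((PySem.List.pyRange 0 (m : Int) 1).foldl (fun pal i =>
        PySem.List.pySetD pal i (PySem.List.pySetD (PySem.List.pyGetD pal i []) (i + (L : Int) - 1)
          ((PySem.List.pyGetD cs i ' ' == PySem.List.pyGetD cs (i + (L : Int) - 1) ' ') &&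
            ((L : Int) == 2 || PySem.List.pyGetD (PySem.List.pyGetD pal (i + 1) []) (i + (L : Int) - 1 - 1) false)))) pal) a b
        = if b + 1 - a = L ∧ a < m then pdRec cs a b else getP pal a b := by
  induction m with
  | zero =>
    rw [show ((0 : Nat) : Int) = 0 by rfl, PySem.List.pyRange_one_eq_nil (by omega)]
    refine ⟨hS, ?_⟩
    intro a b _ _
    simp only [List.foldl_nil]
    rw [if_neg (by omega)]
  | succ m ih =>
    have ih' := ih (by omega)
    rw [show ((m + 1 : Nat) : Int) = (m : Int) + 1 by push_cast; ring,
      PySem.List.pyRange_one_succ_right (by omega), List.foldl_append]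
    set palm := (PySem.List.pyRange 0 (m : Int) 1).foldl _ pal with hpalm
    simp only [List.foldl_cons, List.foldl_nil]
    have e1 : ((m : Int) + (L : Int) - 1) = ((m + L - 1 : Nat) : Int) := by omega
    have e2 : ((m : Int) + (L : Int) - 1 - 1) = ((m + L - 2 : Nat) : Int) := by omega
    have e3 : ((m : Int) + 1) = ((m + 1 : Nat) : Int) := by omega
    rw [e2, e1, e3]
    simp only [PySem.List.pySetD_natCast, PySem.List.pyGetD_natCast]
    have hSm := ih'.1
    have hmn : m < cs.length := by omega
    have hjn : m + L - 1 < cs.length := by omega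
    -- the value written at cell (m, m+L-1) is pdRec cs m (m+L-1)
    have hval : ((cs.getD m ' ' == cs.getD (m + L - 1) ' ') &&
        ((L : Int) == 2 || (palm.getD (m + 1) []).getD (m + L - 2) false))
        = pdRec cs m (m + L - 1) := by
      rw [pdRec, dif_pos (by omega : m < m + L - 1)]
      by_cases hL : L = 2
      · subst hL
        rw [show ((((2 : Nat) : Int)) == (2 : Int)) = true from by decide, Bool.true_or]
        rw [show m + 2 - 1 = m + 1 from by omega]
        rw [show (m + 1 == m + 1) = true from by simp, Bool.true_or]
      · have hLe3 : 3 ≤ L := by omega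
        have hbeqL : (((L : Nat) : Int) == 2) = false := by
          simp only [beq_eq_false_iff_ne, ne_eq]
          omega
        have hbeqN : (m + L - 1 == m + 1) = false := by
          simp only [beq_eq_false_iff_ne, ne_eq]
          omega
        rw [hbeqL, hbeqN]
        have hread : (palm.getD (m + 1) []).getD (m + L - 2) false
            = pdRec cs (m + 1) (m + L - 2) := by
          have := ih'.2 (m + 1) (m + L - 2) (by omega) (by omega)
          rw [show getP palm (m + 1) (m + L - 2)
            = (palm.getD (m + 1) []).getD (m + L - 2) false from rfl] at this
          rw [this, if_neg (by omega)]
          have := hI (m + 1) (m + L - 2) (by omega) (by omega)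
          rw [this, if_pos (by omega)]
        rw [hread]
        simp only [Bool.false_or]
        rw [show m + L - 1 - 1 = m + L - 2 from by omega]
    rw [hval]
    refine ⟨shape_update cs palm hSm m (m + L - 1) hmn _, ?_⟩
    intro a b hab hb
    rw [getP_update cs palm hSm m (m + L - 1) hmn hjn _ a b, ih'.2 a b hab hb]
    by_cases hcell : m = a ∧ m + L - 1 = b
    · rw [if_pos hcell, if_pos (by omega)]
      rw [← hcell.1, ← hcell.2]
    · rw [if_neg hcell]
      split_ifs <;> first | rfl | omega

-- all DP rounds: fold over lengths 2..M fills every length ≤ M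
theorem outer_fold (cs : List Char) (pal1 : List (List Bool)) (hS : Shape cs.length pal1)
    (hI : PalInv cs 1 pal1) (M : Nat) (hM1 : 1 ≤ M) (hMn : M ≤ cs.length) :
    Shape cs.length ((PySem.List.pyRange 2 ((M : Int) + 1) 1).foldl (fun pal ln =>
      (PySem.List.pyRange 0 ((cs.length : Int) - ln + 1) 1).foldl (fun pal i =>
        PySem.List.pySetD pal i (PySem.List.pySetD (PySem.List.pyGetD pal i []) (i + ln - 1)
          ((PySem.List.pyGetD cs i ' ' == PySem.List.pyGetD cs (i + ln - 1) ' ') &&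
            (ln == 2 || PySem.List.pyGetD (PySem.List.pyGetD pal (i + 1) []) (i + ln - 1 - 1) false)))) pal) pal1) ∧
    PalInv cs M ((PySem.List.pyRange 2 ((M : Int) + 1) 1).foldl (fun pal ln =>
      (PySem.List.pyRange 0 ((cs.length : Int) - ln + 1) 1).foldl (fun pal i =>
        PySem.List.pySetD pal i (PySem.List.pySetD (PySem.List.pyGetD pal i []) (i + ln - 1)
          ((PySem.List.pyGetD cs i ' ' == PySem.List.pyGetD cs (i + ln - 1) ' ') &&
            (ln == 2 || PySem.List.pyGetD (PySem.List.pyGetD pal (i + 1) []) (i + ln - 1 - 1) false)))) pal) pal1) := by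
  induction M, hM1 using Nat.le_induction with
  | base =>
    rw [show ((1 : Nat) : Int) + 1 = 2 by norm_num, PySem.List.pyRange_one_eq_nil (by omega)]
    exact ⟨hS, hI⟩
  | succ M hM1' ih =>
    have ih' := ih (by omega)
    rw [show ((M + 1 : Nat) : Int) + 1 = ((M : Int) + 1) + 1 by push_cast; ring,
      PySem.List.pyRange_one_succ_right (by omega), List.foldl_append]
    set palM := (PySem.List.pyRange 2 ((M : Int) + 1) 1).foldl _ pal1 with hpalM
    simp only [List.foldl_cons, List.foldl_nil]
    rw [show ((M : Int) + 1) = ((M + 1 : Nat) : Int) by omega,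
      show ((cs.length : Int) - ((M + 1 : Nat) : Int) + 1) = ((cs.length - (M + 1) + 1 : Nat) : Int) by omega]
    have hIM : PalInv cs (M + 1 - 1) palM := by
      rw [Nat.add_sub_cancel]; exact ih'.2
    obtain ⟨hSr, hchar⟩ := round_fold cs (M + 1) (by omega) (by omega) palM ih'.1 hIM
      (cs.length - (M + 1) + 1) (le_refl _)
    refine ⟨hSr, ?_⟩
    intro a b hab hb
    rw [hchar a b hab hb]
    by_cases hbl : b + 1 - a = M + 1
    · rw [if_pos ⟨hbl, by omega⟩, if_pos (by omega)]
    · rw [if_neg (fun h => hbl h.1), ih'.2 a b hab hb]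
      split_ifs <;> first | rfl | omega

theorem pdRec_diag (cs : List Char) (a : Nat) : pdRec cs a a = true := by
  rw [pdRec]; simp

theorem pal0_facts (cs : List Char) :
    Shape cs.length ((PySem.List.pyRange 0 ((cs.length : Int)) 1).map (fun _ => List.replicate cs.length false)) ∧
    ∀ a b : Nat, getP ((PySem.List.pyRange 0 ((cs.length : Int)) 1).map (fun _ => List.replicate cs.length false)) a b = false := by
  have hlen : ((PySem.List.pyRange 0 ((cs.length : Int)) 1).map
      (fun _ => List.replicate cs.length false)).length = cs.length := by
    rw [List.length_map, PySem.List.length_pyRange_one]; omega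
  constructor
  · refine ⟨hlen, ?_⟩
    intro r hr
    obtain ⟨x, _, rfl⟩ := List.mem_map.mp hr
    exact List.length_replicate
  · intro a b
    unfold getP
    by_cases ha : a < cs.length
    · have : ((PySem.List.pyRange 0 ((cs.length : Int)) 1).map
          (fun _ => List.replicate cs.length false)).getD a [] = List.replicate cs.length false := by
        rw [List.getD_eq_getElem?_getD, List.getElem?_eq_getElem (by omega : a < ((PySem.List.pyRange 0 ((cs.length : Int)) 1).map (fun _ => List.replicate cs.length false)).length)]
        simp
      rw [this]
      simp [List.getD_eq_getElem?_getD]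
    · have : ((PySem.List.pyRange 0 ((cs.length : Int)) 1).map
          (fun _ => List.replicate cs.length false)).getD a [] = [] := by
        rw [List.getD_eq_getElem?_getD, List.getElem?_eq_none (by omega : ((PySem.List.pyRange 0 ((cs.length : Int)) 1).map (fun _ => List.replicate cs.length false)).length ≤ a)]
        rfl
      rw [this]
      rfl

theorem main_eq (s : String) : force s = force_alt s := by
  unfold force force_alt
  simp only [PySem.List.len_eq, Int.toNat_natCast]
  set cs := s.toList with hcs
  by_cases hn : cs.length ≤ 1
  · rw [PySem.List.pyRange_one_eq_nil (by omega : ((cs.length : Int) - 1) ≤ 0)]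
    simp
  · -- the filled table is correct
    have hd := diag_fold cs _ (pal0_facts cs).1 (pal0_facts cs).2 cs.length (le_refl _)
    have hI1 : PalInv cs 1 ((PySem.List.pyRange 0 ((cs.length : Nat) : Int) 1).foldl (fun pal i =>
        PySem.List.pySetD pal i (PySem.List.pySetD (PySem.List.pyGetD pal i []) i true))
        ((PySem.List.pyRange 0 ((cs.length : Int)) 1).map (fun _ => List.replicate cs.length false))) := by
      intro a b hab hb
      rw [hd.2 a b]
      split_ifs with h1 h2 h2
      · have : a = b := by omega
        subst this
        exact (pdRec_diag cs a).symm
      · omega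
      · omega
      · rfl
    have houter := outer_fold cs _ hd.1 hI1 cs.length (by omega) (le_refl _)
    refine congrArg Prod.snd ?_
    apply PySem.List.foldl_congr_mem
    intro st i hi
    apply PySem.List.foldl_congr_mem
    intro st' j hj
    rw [PySem.List.mem_pyRange_one] at hi hj
    lift i to Nat using hi.1 with a
    lift j to Nat using (by omega : (0 : Int) ≤ j) with b
    have hab : a < b := by exact_mod_cast (by omega : (a : Int) < (b : Int))
    have hbn : b < cs.length := by exact_mod_cast hj.2
    have hpal : PySem.List.pyGetD (PySem.List.pyGetD
        ((PySem.List.pyRange 2 ((cs.length : Int) + 1) 1).foldl (fun pal ln =>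
          (PySem.List.pyRange 0 ((cs.length : Int) - ln + 1) 1).foldl (fun pal i =>
            PySem.List.pySetD pal i (PySem.List.pySetD (PySem.List.pyGetD pal i []) (i + ln - 1)
              ((PySem.List.pyGetD cs i ' ' == PySem.List.pyGetD cs (i + ln - 1) ' ') &&
                (ln == 2 || PySem.List.pyGetD (PySem.List.pyGetD pal (i + 1) []) (i + ln - 1 - 1) false)))) pal)
          ((PySem.List.pyRange 0 ((cs.length : Nat) : Int) 1).foldl (fun pal i =>
            PySem.List.pySetD pal i (PySem.List.pySetD (PySem.List.pyGetD pal i []) i true))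
            ((PySem.List.pyRange 0 ((cs.length : Int)) 1).map (fun _ => List.replicate cs.length false))))
        (a : Int) []) (b : Int) false = pdRec cs a b := by
      simp only [PySem.List.pyGetD_natCast]
      have hx := houter.2 a b (by omega) hbn
      unfold getP at hx
      rw [hx, if_pos (by omega)]
    have hc := condA_eq cs a b hab hbn
    rw [hpal, ← hc]
    cases hc1 : (PySem.List.pyGetD cs (b : Int) ' ' == PySem.List.pyGetD cs (a : Int) ' ') <;>
      cases hc2 : (PySem.List.slice? (PySem.List.slice cs (some (a : Int)) (some ((b : Int) + 1))) none none (-1)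
          == some (PySem.List.slice cs (some (a : Int)) (some ((b : Int) + 1)))) <;>
        by_cases hp : st'.1 ≤ (b : Int) - (a : Int) + 1 <;>
          simp [hc1, hc2, hp]

-- ===== VERDICT (by name: the statement is the Claim_ definition above) =====
theorem force_spec : Claim_equal_force := by
  intro s _
  unfold Spec_force
  exact main_eq s
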